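-- pv_equiv track=rewrite | github.com/uwplse/ruler | scripts/preproceess.py | modulo_alpha_rename
-- ===== SOURCE A (Python) =====
-- def modulo_alpha_rename(rules):
--     ret = []
--     unique_vars = set()
--     alpha = "abcdefghijklmnopqrstuvwxyz"
--     for r in rules:
--         r = add_space_between_parens(r)
--         mappings = dict()
--         splits = r.split(" ")
--         for i in range(len(splits)):
--             e = splits[i]
--             if "?" in e:
--                 if e in mappings:
--                     splits[i] = mappings[e]
--                 else:
--                     new_e = "@" + alpha[len(mappings)]
--                     splits[i] = new_e
--                     mappings[e] = new_e
--         new_rule = remove_space_between_parens(' '.join(splits))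
--         for k in mappings:
--             unique_vars.add(k)
--         ret.append(new_rule)
--     if len(ret) == 1:
--         return (ret, unique_vars)
--     else:
--         if ret[0] == ret[1]:
--             return ([ret[0]], unique_vars)
--         else:
--             return (ret, unique_vars)
--
-- def add_space_between_parens(r):
--     r = r.replace('(', ' ( ')
--     r = r.replace(')', ' ) ')
--     return r
--
-- def remove_space_between_parens(r):
--     r = r.replace(' ( ', '(')
--     r = r.replace(' ) ', ')')
--     return r
-- ===== SOURCE B (Python) =====
-- import re
--
-- def add_space_between_parens(r):
--     r = r.replace('(', ' ( ')
--     r = r.replace(')', ' ) ')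
--     return r
--
-- def remove_space_between_parens(r):
--     r = r.replace(' ( ', '(')
--     r = r.replace(' ) ', ')')
--     return r
--
-- _VAR_TOKEN = re.compile(r'[^ ]*\?[^ ]*')  # maximal run of non-space chars containing '?'
--
-- def modulo_alpha_rename(rules):
--     ret = []
--     unique_vars = set()
--     alpha = "abcdefghijklmnopqrstuvwxyz"
--     for r in rules:
--         spaced = add_space_between_parens(r)
--         mappings = {}
--
--         def repl(m):
--             tok = m.group(0)
--             if tok not in mappings:
--                 mappings[tok] = "@" + alpha[len(mappings)]
--             return mappings[tok]
--
--         renamed = _VAR_TOKEN.sub(repl, spaced)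
--         unique_vars.update(mappings)
--         ret.append(remove_space_between_parens(renamed))
--     if len(ret) == 1:
--         return (ret, unique_vars)
--     else:
--         if ret[0] == ret[1]:
--             return ([ret[0]], unique_vars)
--         else:
--             return (ret, unique_vars)
-- ===== Notes on version B (the rewrite author's own statement) =====
-- stated objective: idiomatic
-- what changed: Per rule, A splits the spaced string on ' ' into a list, mutates it in an index loop and rejoins; B never builds the token list: a single re.sub with a callback over the pattern [^ ]*\?[^ ]* (maximal non-space run containing '?') renames the variables in one scan, with the same per-rule mappings dict and first-appearance letter assignment; the paren-spacing helpers and the final dedup logic are kept.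
import Mathlib
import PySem

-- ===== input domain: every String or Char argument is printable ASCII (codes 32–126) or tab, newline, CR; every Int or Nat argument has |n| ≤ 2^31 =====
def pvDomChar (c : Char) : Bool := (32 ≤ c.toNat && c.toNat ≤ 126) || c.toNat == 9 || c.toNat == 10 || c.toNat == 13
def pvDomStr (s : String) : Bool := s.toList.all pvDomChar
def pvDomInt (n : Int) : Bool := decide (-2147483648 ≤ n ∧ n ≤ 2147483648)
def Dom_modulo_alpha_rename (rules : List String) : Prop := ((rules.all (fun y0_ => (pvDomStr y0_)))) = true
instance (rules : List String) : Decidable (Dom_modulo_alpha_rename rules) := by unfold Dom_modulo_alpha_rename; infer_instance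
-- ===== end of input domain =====

-- B replaces A's split-on-space / index-loop / rejoin per rule by a single regex-callback scan
-- (re.sub(r'[^ ]*\?[^ ]*', repl, spaced)) over the spaced string (objective: idiomatic).

-- ===== PORT A =====
-- shared helpers, exactly the Python helper functions
def pvAddSpace (r : String) : String :=
  PySem.Str.replace (PySem.Str.replace r "(" " ( ") ")" " ) "

def pvRemoveSpace (r : String) : String :=
  PySem.Str.replace (PySem.Str.replace r " ( " "(") " ) " ")"

def pvAlpha : String := "abcdefghijklmnopqrstuvwxyz"

-- "@" + alpha[len(mappings)]; alpha[·] raises IndexError at 26 distinct vars (excluded by Pre_);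
-- the total form appends nothing there.
def pvFresh (m : PySem.Dict String String) : String :=
  String.ofList ('@' :: (match PySem.Str.pyGet? pvAlpha ((m.size : Nat) : Int) with
                         | some c => [c]
                         | none => []))

-- the body of A's inner 'for i in range(len(splits))' loop
def pvLoopBodyA (p : List String × PySem.Dict String String) (i : Int) :
    List String × PySem.Dict String String :=
  let e := PySem.List.pyGetD p.1 i ""
  if PySem.Str.isIn "?" e then
    if p.2.contains e then (PySem.List.pySetD p.1 i (p.2.getD e ""), p.2)
    else
      let new_e := pvFresh p.2
      (PySem.List.pySetD p.1 i new_e, p.2.insert e new_e)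
  else p

-- the body of A's outer 'for r in rules' loop
def pvRuleA (st : List String × PySem.Set String) (r : String) : List String × PySem.Set String :=
  let r := pvAddSpace r
  let splits : List String := (PySem.Str.split? r " ").getD []
  let q := (PySem.List.pyRange 0 (PySem.List.len splits) 1).foldl pvLoopBodyA
             (splits, PySem.Dict.empty)
  let new_rule := pvRemoveSpace (PySem.Str.join " " q.1)
  (st.1 ++ [new_rule], PySem.Set.update st.2 q.2.keys)

-- the final if/len(ret)/dedup logic, textually shared by A and B
def pvFinish (p : List String × PySem.Set String) : List String × List String :=
  if p.1.length = 1 then (p.1, p.2)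
  else
    -- ret[0] / ret[1]: IndexError on empty rules is excluded by Pre_; total form defaults to ""
    if PySem.List.pyGetD p.1 0 "" = PySem.List.pyGetD p.1 1 "" then
      ([PySem.List.pyGetD p.1 0 ""], p.2)
    else (p.1, p.2)

def modulo_alpha_rename (rules : List String) : List String × List String :=
  pvFinish (rules.foldl pvRuleA ([], PySem.Set.empty))

-- ===== PORT B =====
-- hand port of re.sub(r'[^ ]*\?[^ ]*', repl, spaced): the pattern matches exactly the maximal
-- runs of non-space characters that contain '?', left to right, leaving all other characters
-- (in particular every space) untouched; repl looks the token up in mappings, assigning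
-- "@"+alpha[len(mappings)] to unseen tokens.  Exact: a match of this pattern can only start at
-- the start of a maximal non-space run and then greedily takes the whole run.
def pvScan (m : PySem.Dict String String) : List Char → List Char × PySem.Dict String String
  | [] => ([], m)
  | c :: cs =>
    if c = ' ' then
      let q := pvScan m cs
      (' ' :: q.1, q.2)
    else
      let tok := (c :: cs).takeWhile (· ≠ ' ')
      let rest := (c :: cs).dropWhile (· ≠ ' ')
      if '?' ∈ tok then
        match m.get? (String.ofList tok) with
        | some v =>
          let q := pvScan m rest
          (v.toList ++ q.1, q.2)
        | none =>
          let v := pvFresh m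
          let q := pvScan (m.insert (String.ofList tok) v) rest
          (v.toList ++ q.1, q.2)
      else
        let q := pvScan m rest
        (tok ++ q.1, q.2)
  termination_by cs => cs.length
  decreasing_by
    · simp
    all_goals
      simp only [List.dropWhile_cons]
      split
      · exact Nat.lt_succ_of_le (List.length_dropWhile_le _ _)
      · simp_all

-- the body of B's outer 'for r in rules' loop
def pvRuleB (st : List String × PySem.Set String) (r : String) : List String × PySem.Set String :=
  let spaced := pvAddSpace r
  let q := pvScan PySem.Dict.empty spaced.toList
  (st.1 ++ [pvRemoveSpace (String.ofList q.1)], PySem.Set.update st.2 q.2.keys)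

def modulo_alpha_rename_alt (rules : List String) : List String × List String :=
  pvFinish (rules.foldl pvRuleB ([], PySem.Set.empty))

-- ===== PRECONDITION & SPEC =====
-- Pre_ excludes exactly the inputs on which the Python A raises IndexError: the empty rule list
-- (ret[0] on an empty ret) and any rule whose spaced form has more than 26 distinct
-- '?'-containing tokens (alpha[26]).
def Pre_modulo_alpha_rename (rules : List String) : Prop :=
  rules ≠ [] ∧ ∀ r ∈ rules,
    (PySem.Set.ofList
      (((PySem.Str.split? (pvAddSpace r) " ").getD []).filter
        (fun e => PySem.Str.isIn "?" e))).length ≤ 26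
instance (rules : List String) : Decidable (Pre_modulo_alpha_rename rules) := by
  unfold Pre_modulo_alpha_rename; infer_instance

def pvWitness_modulo_alpha_rename : List String := ["(+ ?a ?b)", "(+ ?b ?a)"]

def Spec_modulo_alpha_rename (rules : List String) (out : List String × List String) : Prop := out = modulo_alpha_rename_alt rules
instance (rules : List String) (out : List String × List String) : Decidable (Spec_modulo_alpha_rename rules out) := by unfold Spec_modulo_alpha_rename; infer_instance

-- ===== CLAIM (what is proved, stated in full; the proofs are below) =====
def Claim_equal_modulo_alpha_rename : Prop := ∀ (rules : List String), Dom_modulo_alpha_rename rules → Pre_modulo_alpha_rename rules → Spec_modulo_alpha_rename rules (modulo_alpha_rename rules)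

-- ===== LEMMAS AND PROOFS =====

-- structural characterisation of splitting on a single space
def pvSpl : List Char → List (List Char)
  | [] => [[]]
  | c :: r => if c = ' ' then [] :: pvSpl r else (pvSpl r).modifyHead (c :: ·)

theorem pvSpl_ne_nil (l : List Char) : pvSpl l ≠ [] := by
  induction l with
  | nil => simp [pvSpl]
  | cons c r ih =>
    simp only [pvSpl]
    split
    · simp
    · cases h : pvSpl r with
      | nil => exact absurd h ih
      | cons a b => simp [List.modifyHead]

theorem pvSpl_takeWhile (l : List Char) :
    pvSpl l = l.takeWhile (· ≠ ' ') ::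
      (match l.dropWhile (· ≠ ' ') with | [] => [] | _ :: r => pvSpl r) := by
  induction l with
  | nil => simp [pvSpl]
  | cons c r ih =>
    by_cases hc : c = ' '
    · subst hc; simp [pvSpl]
    · simp only [pvSpl, if_neg hc, List.takeWhile_cons, List.dropWhile_cons]
      rw [ih]
      simp [hc, List.modifyHead]

theorem pv_go_space (fuel : Nat) (l cur : List Char) (acc : List (List Char))
    (h : l.length ≤ fuel) :
    PySem.Chars.splitOn.go [' '] fuel l cur acc
      = acc.reverse ++ (pvSpl l).modifyHead (cur.reverse ++ ·) := by
  induction fuel generalizing l cur acc with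
  | zero =>
    interval_cases hl : l.length
    rw [List.length_eq_zero_iff] at hl
    subst hl
    simp [PySem.Chars.splitOn.go, pvSpl]
  | succ fuel ih =>
    cases l with
    | nil => simp [PySem.Chars.splitOn.go, pvSpl]
    | cons c rest =>
      by_cases hc : c = ' '
      · subst hc
        rw [PySem.Chars.splitOn.go]
        have hp : [' '].isPrefixOf (' ' :: rest) = true := by simp [List.isPrefixOf]
        rw [if_pos hp]
        simp only [List.length_cons, List.length_nil, Nat.zero_add, List.drop_succ_cons, List.drop_zero]
        rw [ih rest [] (cur.reverse :: acc) (by simpa using Nat.le_of_succ_le_succ h)]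
        simp [pvSpl]
        cases pvSpl rest <;> simp
      · rw [PySem.Chars.splitOn.go]
        have hp : [' '].isPrefixOf (c :: rest) = false := by
          simp [List.isPrefixOf]; exact fun hh => absurd hh.symm hc
        rw [if_neg (by simp [hp])]
        rw [ih rest (c :: cur) acc (by simpa using Nat.le_of_succ_le_succ h)]
        simp only [pvSpl, if_neg hc, List.modifyHead_modifyHead]
        congr 2
        funext x
        simp

theorem pv_splitOn_space (l : List Char) : PySem.Chars.splitOn l [' '] = pvSpl l := by
  rw [PySem.Chars.splitOn, pv_go_space _ _ _ _ (by omega)]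
  simp
  cases pvSpl l <;> simp

-- the per-token effect both programs implement
def pvStepTok (m : PySem.Dict String String) (t : List Char) :
    List Char × PySem.Dict String String :=
  if '?' ∈ t then
    match m.get? (String.ofList t) with
    | some v => (v.toList, m)
    | none => ((pvFresh m).toList, m.insert (String.ofList t) (pvFresh m))
  else (t, m)

def pvGoToks (m : PySem.Dict String String) :
    List (List Char) → List (List Char) × PySem.Dict String String
  | [] => ([], m)
  | t :: ts =>
    let p := pvStepTok m t
    let q := pvGoToks p.2 ts
    (p.1 :: q.1, q.2)

theorem pvGoToks_length (m : PySem.Dict String String) (ts : List (List Char)) :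
    (pvGoToks m ts).1.length = ts.length := by
  induction ts generalizing m with
  | nil => rfl
  | cons t ts ih => simp [pvGoToks, ih]

theorem pv_isIn_q (t : List Char) :
    PySem.Str.isIn "?" (String.ofList t) = true ↔ '?' ∈ t := by
  rw [PySem.Str.isIn_iff_infix]
  simp only [String.toList_ofList]
  constructor
  · intro h
    exact h.subset (by simp)
  · intro h
    obtain ⟨l1, l2, rfl⟩ := List.append_of_mem h
    exact ⟨l1, l2, by simp⟩

theorem pv_join_ofList (us : List (List Char)) :
    PySem.Str.join " " (us.map String.ofList) = String.ofList (PySem.Chars.join [' '] us) := by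
  have hol : ∀ s : String, String.ofList s.toList = s := fun s => String.ofList_toList
  conv_lhs => rw [← hol (PySem.Str.join " " (us.map String.ofList))]
  rw [PySem.Str.toList_join]
  simp [List.map_map, Function.comp_def]

theorem pv_splits_eq (s : String) :
    ((PySem.Str.split? s " ").getD []) = (pvSpl s.toList).map String.ofList := by
  have h := PySem.Str.split?_map s " "
  rw [PySem.Chars.split?] at h
  rw [if_neg (by simp)] at h
  cases hs : PySem.Str.split? s " " with
  | none => rw [hs] at h; simp at h
  | some l =>
    rw [hs] at h
    simp only [Option.map_some, Option.some.injEq] at h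
    rw [show (" " : String).toList = [' '] from rfl, pv_splitOn_space] at h
    rw [← h]
    simp [List.map_map, Function.comp_def]

theorem pvScan_eq (cs : List Char) (m : PySem.Dict String String) :
    pvScan m cs = (PySem.Chars.join [' '] (pvGoToks m (pvSpl cs)).1,
                   (pvGoToks m (pvSpl cs)).2) := by
  induction hn : cs.length using Nat.strong_induction_on generalizing cs m with
  | _ n ih =>
  cases cs with
  | nil => simp [pvScan, pvSpl, pvGoToks, pvStepTok, PySem.Chars.join_singleton]
  | cons c rest =>
    by_cases hc : c = ' '
    · subst hc
      rw [pvScan]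
      rw [ih rest.length (by rw [List.length_cons] at hn; omega) rest m rfl]
      have hsp : pvSpl (' ' :: rest) = [] :: pvSpl rest := by simp [pvSpl]
      rw [hsp]
      have hst : pvStepTok m [] = ([], m) := by simp [pvStepTok]
      simp only [pvGoToks, hst]
      obtain ⟨u, us, hu⟩ := List.exists_cons_of_ne_nil
        (by rw [← List.length_pos_iff, pvGoToks_length]; exact List.length_pos_of_ne_nil (pvSpl_ne_nil rest)
          : (pvGoToks m (pvSpl rest)).1 ≠ [])
      rw [hu]
      simp [PySem.Chars.join_cons_cons]
    · rw [pvScan]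
      rw [if_neg hc]
      have htk : (c :: rest).takeWhile (· ≠ ' ') = c :: rest.takeWhile (· ≠ ' ') := by
        simp [hc]
      have hdw : (c :: rest).dropWhile (· ≠ ' ') = rest.dropWhile (· ≠ ' ') := by
        simp [hc]
      have hsp := pvSpl_takeWhile (c :: rest)
      cases hrest : (c :: rest).dropWhile (· ≠ ' ') with
      | nil =>
        rw [hrest] at hsp
        simp only at hsp
        rw [hsp]
        simp only [pvGoToks]
        rw [PySem.Chars.join_singleton]
        -- rest of scan: pvScan _ [] = ([], _)
        simp only [pvStepTok]
        split
        · split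
          · simp [pvScan]
          · simp [pvScan]
        · simp [pvScan]
      | cons d r2 =>
        have hd : d = ' ' := by
          have hne : (c :: rest).dropWhile (· ≠ ' ') ≠ [] := by rw [hrest]; simp
          have := List.head_dropWhile_not (· ≠ ' ') hne
          simp only [hrest, List.head_cons] at this
          simpa using this
        subst hd
        rw [hrest] at hsp
        simp only at hsp
        rw [hsp]
        have hlen2 : r2.length < n := by
          have h1 : ((c :: rest).dropWhile (· ≠ ' ')).length ≤ rest.length := by
            rw [hdw]; exact List.length_dropWhile_le _ _
          rw [hrest] at h1
          rw [List.length_cons] at h1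
          rw [List.length_cons] at hn
          omega
        have key : ∀ m' : PySem.Dict String String,
            pvScan m' (' ' :: r2) = (' ' :: (pvScan m' r2).1, (pvScan m' r2).2) := by
          intro m'; rw [pvScan]; simp
        have tail_eq : ∀ (m' : PySem.Dict String String) (X : List Char),
            (X ++ (pvScan m' (' ' :: r2)).1, (pvScan m' (' ' :: r2)).2)
              = (PySem.Chars.join [' '] (X :: (pvGoToks m' (pvSpl r2)).1),
                 (pvGoToks m' (pvSpl r2)).2) := by
          intro m' X
          rw [key m', ih r2.length hlen2 r2 m' rfl]
          obtain ⟨u, us, hu⟩ := List.exists_cons_of_ne_nil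
            (show (pvGoToks m' (pvSpl r2)).1 ≠ [] by
              rw [← List.length_pos_iff, pvGoToks_length]
              exact List.length_pos_of_ne_nil (pvSpl_ne_nil r2))
          rw [hu, PySem.Chars.join_cons_cons]
          simp
        simp only [pvGoToks, pvStepTok]
        by_cases hq : '?' ∈ (c :: rest).takeWhile (· ≠ ' ')
        · simp only [if_pos hq]
          cases hg : m.get? (String.ofList ((c :: rest).takeWhile (· ≠ ' '))) with
          | some v => exact tail_eq m v.toList
          | none => exact tail_eq _ _
        · simp only [if_neg hq]
          exact tail_eq m _

theorem pv_loopA (ts : List (List Char)) (done : List String) (m : PySem.Dict String String) :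
    (PySem.List.pyRange (done.length : Int) ((done.length : Int) + (ts.length : Int)) 1).foldl
        pvLoopBodyA (done ++ ts.map String.ofList, m)
      = (done ++ (pvGoToks m ts).1.map String.ofList, (pvGoToks m ts).2) := by
  induction ts generalizing done m with
  | nil =>
    rw [PySem.List.pyRange_one_eq_nil (by simp)]
    simp [pvGoToks]
  | cons t ts ih =>
    rw [PySem.List.pyRange_one_cons (by push_cast [List.length_cons]; omega)]
    rw [List.foldl_cons]
    simp only [List.map_cons]
    have hget : PySem.List.pyGetD (done ++ String.ofList t :: ts.map String.ofList)
        ((done.length : Nat) : Int) "" = String.ofList t := by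
      rw [PySem.List.pyGetD_natCast]
      simp
    have hstep : pvLoopBodyA (done ++ String.ofList t :: ts.map String.ofList, m)
          ((done.length : Nat) : Int)
        = (done ++ String.ofList (pvStepTok m t).1 :: ts.map String.ofList, (pvStepTok m t).2) := by
      simp only [pvLoopBodyA, hget, pvStepTok]
      by_cases hq : '?' ∈ t
      · rw [if_pos ((pv_isIn_q t).mpr hq), if_pos hq]
        rw [PySem.Dict.contains_eq_isSome_get?]
        cases hg : m.get? (String.ofList t) with
        | some v =>
          simp only [Option.isSome_some, if_true]
          rw [PySem.Dict.getD_eq_get?_getD, hg]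
          simp [PySem.List.pySetD_natCast]
        | none =>
          simp [PySem.List.pySetD_natCast]
      · rw [if_neg (by rw [pv_isIn_q]; exact hq), if_neg hq]
    rw [hstep]
    simp only [pvGoToks, List.map_cons]
    have h1 := ih (done ++ [String.ofList (pvStepTok m t).1]) (pvStepTok m t).2
    simp only [List.length_append, List.length_nil, List.length_cons, List.append_assoc,
      List.singleton_append] at h1 ⊢
    push_cast at h1 ⊢
    rw [show ((done.length : Int) + ((ts.length : Int) + 1)) =
          ((done.length : Int) + 1 + (ts.length : Int)) from by ring]
    exact h1

theorem pvRuleA_eq_pvRuleB : pvRuleA = pvRuleB := by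
  funext st r
  have hB : pvRuleB st r
      = (st.1 ++ [pvRemoveSpace (String.ofList (PySem.Chars.join [' ']
            (pvGoToks PySem.Dict.empty (pvSpl (pvAddSpace r).toList)).1))],
         PySem.Set.update st.2
           (pvGoToks PySem.Dict.empty (pvSpl (pvAddSpace r).toList)).2.keys) := by
    simp only [pvRuleB, pvScan_eq]
  have h0 := pv_loopA (pvSpl (pvAddSpace r).toList) [] PySem.Dict.empty
  simp only [List.length_nil, Nat.cast_zero, zero_add, List.nil_append] at h0
  have hA : pvRuleA st r
      = (st.1 ++ [pvRemoveSpace (String.ofList (PySem.Chars.join [' ']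
            (pvGoToks PySem.Dict.empty (pvSpl (pvAddSpace r).toList)).1))],
         PySem.Set.update st.2
           (pvGoToks PySem.Dict.empty (pvSpl (pvAddSpace r).toList)).2.keys) := by
    simp only [pvRuleA, pv_splits_eq, PySem.List.len_eq, List.length_map]
    rw [h0, pv_join_ofList]
  rw [hA, hB]

-- ===== VERDICT (by name: the statement is the Claim_ definition above) =====
theorem modulo_alpha_rename_spec : Claim_equal_modulo_alpha_rename := by
  intro rules _ _
  unfold Spec_modulo_alpha_rename modulo_alpha_rename modulo_alpha_rename_alt
  rw [pvRuleA_eq_pvRuleB]
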